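-- pv_equiv track=rewrite | github.com/xz-blender/wxz_pie_menus | parts_addons/kushiro_all_tools/padding_inset.py | filter_same
-- ===== SOURCE A (Python) =====
-- def filter_same(ps):
--     psk = list(ps)
--     while True:
--         ps2 = []
--         changed = False
--         for i in range(len(psk)):
--             i2 = (i + 1) % len(psk)
--             v1 = psk[i]
--             v2 = psk[i2]
--             if v1 == v2:
--                 changed = True
--                 continue
--             ps2.append(v1)
--         psk = ps2
--         if not changed:
--             break
--     return psk
-- ===== SOURCE B (Python) =====
-- def filter_same(ps):
--     out = [v for v, w in zip(ps, ps[1:]) if v != w]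
--     if ps:
--         out.append(ps[-1])
--         if out[0] == out[-1]:
--             out.pop()
--     return out
-- ===== Notes on version B (the rewrite author's own statement) =====
-- stated objective: simpler
-- what changed: A repeatedly rescans the whole list with modulo indexing until a pass removes nothing; B collapses adjacent duplicates in one linear zip comprehension and handles the circular wraparound with a single append/pop fix-up.
import Mathlib
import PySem

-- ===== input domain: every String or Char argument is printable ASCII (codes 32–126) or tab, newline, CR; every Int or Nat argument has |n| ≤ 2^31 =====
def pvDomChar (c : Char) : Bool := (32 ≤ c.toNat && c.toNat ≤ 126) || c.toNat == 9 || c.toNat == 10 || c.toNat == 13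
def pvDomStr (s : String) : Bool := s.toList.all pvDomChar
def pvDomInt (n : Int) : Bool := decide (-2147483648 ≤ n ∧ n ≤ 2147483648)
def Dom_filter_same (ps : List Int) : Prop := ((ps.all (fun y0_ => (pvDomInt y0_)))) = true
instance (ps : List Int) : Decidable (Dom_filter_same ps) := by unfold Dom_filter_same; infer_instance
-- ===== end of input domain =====

-- B replaces A's repeat-until-stable circular index scan by one linear zip pass plus a single
-- wraparound fix-up (objective: simpler — a short single-pass comprehension instead of a fixpoint loop).

-- ===== PORT A =====
-- the body of A's inner for-loop (one index step)
def fsStep (psk : List Int) (acc : List Int × Bool) (i : Int) : List Int × Bool :=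
  let i2 := PySem.Int.mod (i + 1) psk.length
  let v1 := PySem.List.pyGetD psk i 0
  let v2 := PySem.List.pyGetD psk i2 0
  if v1 = v2 then (acc.1, true) else (acc.1 ++ [v1], acc.2)

-- one iteration of A's while-loop body: the for-loop over range(len(psk))
def fsPass (psk : List Int) : List Int × Bool :=
  (PySem.List.pyRange 0 psk.length 1).foldl (fsStep psk) ([], false)

-- counting invariant of the loop body, used only for termination (cited in decreasing_by)
theorem fsKey (l : List Int) (idxs : List Int) : ∀ acc : List Int × Bool,
    (idxs.foldl (fsStep l) acc).1.length
        + (if (idxs.foldl (fsStep l) acc).2 = true then 1 else 0)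
      ≤ acc.1.length + (if acc.2 = true then 1 else 0) + idxs.length := by
  induction idxs with
  | nil =>
      intro acc
      by_cases hb : acc.2 = true <;> simp [hb]
  | cons i t ih =>
      intro acc
      simp only [List.foldl_cons, List.length_cons]
      refine le_trans (ih _) ?_
      by_cases hv : PySem.List.pyGetD l i 0
          = PySem.List.pyGetD l (PySem.Int.mod (i + 1) l.length) 0 <;>
        by_cases hb : acc.2 = true <;>
        simp [fsStep, hv, hb] <;> omega

theorem fsPass_lt (l : List Int) (h : (fsPass l).2 = true) :
    (fsPass l).1.length < l.length := by
  have key := fsKey l (PySem.List.pyRange 0 l.length 1) ([], false)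
  have hlen : (PySem.List.pyRange 0 (l.length : Int) 1).length = l.length := by
    rw [PySem.List.length_pyRange_one]; omega
  unfold fsPass at h ⊢
  rw [if_pos h] at key
  simp only [List.length_nil, if_neg (Bool.false_ne_true), hlen] at key
  by_cases hl : l.length = 0
  · have h0 : (l.length : Int) = 0 := by exact_mod_cast hl
    rw [h0, PySem.List.pyRange_one_eq_nil (by omega)] at h
    simp at h
  · omega

-- A's while True loop: run the body; stop when no element was removed
def fsLoop (psk : List Int) : List Int :=
  if h : (fsPass psk).2 = true then fsLoop (fsPass psk).1 else (fsPass psk).1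
termination_by psk.length
decreasing_by exact fsPass_lt psk h

def filter_same (ps : List Int) : List Int := fsLoop ps

-- ===== PORT B =====
def filter_same_alt (ps : List Int) : List Int :=
  let out := (ps.zip (PySem.List.slice ps (some 1) none)).filterMap
      (fun p => if p.1 ≠ p.2 then some p.1 else none)
  if ps ≠ [] then
    let out2 := out ++ [PySem.List.pyGetD ps (-1) 0]
    if PySem.List.pyGetD out2 0 0 = PySem.List.pyGetD out2 (-1) 0 then out2.dropLast else out2
  else out

-- ===== PRECONDITION & SPEC =====
def Spec_filter_same (ps : List Int) (out : List Int) : Prop := out = filter_same_alt ps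
instance (ps : List Int) (out : List Int) : Decidable (Spec_filter_same ps out) := by unfold Spec_filter_same; infer_instance

-- ===== CLAIM (what is proved, stated in full; the proofs are below) =====
def Claim_equal_filter_same : Prop := ∀ (ps : List Int), Dom_filter_same ps → Spec_filter_same ps (filter_same ps)

-- ===== LEMMAS AND PROOFS =====

def fsKeep (prs : List (Int × Int)) : List Int :=
  prs.filterMap (fun p => if p.1 = p.2 then none else some p.1)

def fsAny (prs : List (Int × Int)) : Bool := prs.any (fun p => p.1 = p.2)

def fsPairs (l : List Int) : List (Int × Int) := l.zip (l.tail ++ l.take 1)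

theorem fsFold_eq (prs : List (Int × Int)) (acc : List Int × Bool) :
    prs.foldl (fun acc p => if p.1 = p.2 then (acc.1, true) else (acc.1 ++ [p.1], acc.2)) acc
      = (acc.1 ++ fsKeep prs, acc.2 || fsAny prs) := by
  induction prs generalizing acc with
  | nil => simp [fsKeep, fsAny]
  | cons p t ih =>
      by_cases h : p.1 = p.2 <;>
        simp [fsKeep, fsAny, h, ih, List.append_assoc]

theorem fsPairs_length (l : List Int) : (fsPairs l).length = l.length := by
  cases l with
  | nil => simp [fsPairs]
  | cons a t => simp [fsPairs]

theorem fsPairs_eq_map (l : List Int) :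
    (List.range l.length).map
      (fun (k : Nat) => (PySem.List.pyGetD l (k : Int) 0,
                 PySem.List.pyGetD l (PySem.Int.mod ((k : Int) + 1) l.length) 0))
      = fsPairs l := by
  apply List.ext_getElem
  · simp [fsPairs_length]
  · intro i h1 h2
    simp only [List.getElem_map, List.getElem_range]
    have hi : i < l.length := by simpa using h1
    have hmod : PySem.Int.mod ((i : Int) + 1) l.length = (((i + 1) % l.length : Nat) : Int) := by
      by_cases hlt : i + 1 < l.length
      · have h0 : (0 : Int) ≤ (i : Int) + 1 := by positivity
        have hb : ((i : Int) + 1) < (l.length : Int) := by exact_mod_cast hlt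
        have heq : PySem.Int.mod ((i : Int) + 1) l.length = (i : Int) + 1 := by
          simp [PySem.Int.mod, Int.fmod_eq_emod]
          exact Int.emod_eq_of_lt h0 hb
        rw [heq, Nat.mod_eq_of_lt hlt]
        push_cast; ring
      · have hi1 : i + 1 = l.length := by omega
        rw [show ((i : Int) + 1) = (l.length : Int) by exact_mod_cast hi1]
        rw [hi1, Nat.mod_self]
        simp [PySem.Int.mod]
    rw [hmod, PySem.List.pyGetD_natCast, PySem.List.pyGetD_natCast]
    have hm : (i + 1) % l.length < l.length := Nat.mod_lt _ (by omega)
    rw [List.getD_eq_getElem l 0 hi, List.getD_eq_getElem l 0 hm]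
    have h2' : i < (l.zip (l.tail ++ l.take 1)).length := by
      simpa [fsPairs] using h2
    show _ = (l.zip (l.tail ++ l.take 1))[i]'h2'
    rw [List.getElem_zip]
    refine Prod.ext rfl ?_
    simp only
    by_cases hlt : i + 1 < l.length
    · have ht : i < l.tail.length := by simp [List.length_tail]; omega
      rw [List.getElem_append_left ht, List.getElem_tail]
      simp only [Nat.mod_eq_of_lt hlt]
    · have hi1 : i + 1 = l.length := by omega
      have ht : l.tail.length ≤ i := by simp [List.length_tail]; omega
      rw [List.getElem_append_right ht]
      have hz : i - l.tail.length = 0 := by simp [List.length_tail]; omega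
      simp only [hz, List.getElem_take]
      simp only [hi1, Nat.mod_self]

theorem fsPass_eq (l : List Int) : fsPass l = (fsKeep (fsPairs l), fsAny (fsPairs l)) := by
  unfold fsPass
  rw [PySem.List.pyRange_one]
  rw [show (((l.length : Int) - 0)).toNat = l.length by omega]
  simp only [zero_add]
  have key : ((List.range l.length).map
      (fun (k : Nat) => (PySem.List.pyGetD l (k : Int) 0,
          PySem.List.pyGetD l (PySem.Int.mod ((k : Int) + 1) l.length) 0))).foldl
      (fun (acc : List Int × Bool) (p : Int × Int) =>
        if p.1 = p.2 then (acc.1, true) else (acc.1 ++ [p.1], acc.2)) ([], false)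
      = (fsKeep (fsPairs l), fsAny (fsPairs l)) := by
    rw [fsPairs_eq_map l, fsFold_eq]; simp
  have step1 := List.foldl_map
    (f := fun (k : Nat) => ((k : Int)))
    (g := fun (acc : List Int × Bool) (i : Int) =>
      let i2 := PySem.Int.mod (i + 1) (l.length : Int)
      let v1 := PySem.List.pyGetD l i 0
      let v2 := PySem.List.pyGetD l i2 0
      if v1 = v2 then (acc.1, true) else (acc.1 ++ [v1], acc.2))
    (l := List.range l.length) (init := (([], false) : List Int × Bool))
  have step2 := List.foldl_map
    (f := fun (k : Nat) => (PySem.List.pyGetD l (k : Int) 0,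
          PySem.List.pyGetD l (PySem.Int.mod ((k : Int) + 1) l.length) 0))
    (g := fun (acc : List Int × Bool) (p : Int × Int) =>
        if p.1 = p.2 then (acc.1, true) else (acc.1 ++ [p.1], acc.2))
    (l := List.range l.length) (init := (([], false) : List Int × Bool))
  exact step1.trans (step2.symm.trans key)

-- head of the kept list is the head value, and empty kept means the last element is the head
theorem fsKeep_head (a : Int) (t : List Int) (h : fsKeep ((a :: t).zip t) ≠ []) :
    (fsKeep ((a :: t).zip t)).head? = some a := by
  induction t generalizing a with
  | nil => simp [fsKeep] at h
  | cons b t ih =>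
      by_cases hab : a = b
      · subst hab
        simp only [List.zip_cons_cons, fsKeep, List.filterMap_cons, if_pos rfl] at h ⊢
        exact ih a (by simpa [fsKeep] using h)
      · simp [fsKeep, List.filterMap_cons, hab]

theorem fsKeep_nil_last (a : Int) (t : List Int) (h : fsKeep ((a :: t).zip t) = []) :
    (a :: t).getLast (by simp) = a := by
  induction t generalizing a with
  | nil => simp
  | cons b t ih =>
      by_cases hab : a = b
      · subst hab
        simp only [List.zip_cons_cons, fsKeep, List.filterMap_cons, if_pos rfl] at h
        simpa using ih a (by simpa [fsKeep] using h)
      · simp [fsKeep, List.filterMap_cons, hab] at h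

-- cons equations for the kept list
theorem fsKeep_cons_eq (p : Int × Int) (t : List (Int × Int)) (h : p.1 = p.2) :
    fsKeep (p :: t) = fsKeep t := by simp [fsKeep, h]

theorem fsKeep_cons_ne (p : Int × Int) (t : List (Int × Int)) (h : ¬ p.1 = p.2) :
    fsKeep (p :: t) = p.1 :: fsKeep t := by simp [fsKeep, h]

theorem fsKeep_append (xs ys : List (Int × Int)) :
    fsKeep (xs ++ ys) = fsKeep xs ++ fsKeep ys := by simp [fsKeep]

theorem fsAny_append (xs ys : List (Int × Int)) :
    fsAny (xs ++ ys) = (fsAny xs || fsAny ys) := by simp [fsAny]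

theorem fsAny_single (x c : Int) : fsAny [(x, c)] = decide (x = c) := by simp [fsAny]

-- a nonempty kept list starts with the head value
theorem fsKeep_cons_head (a : Int) (t : List Int) (hk : fsKeep ((a :: t).zip t) ≠ []) :
    ∃ K', fsKeep ((a :: t).zip t) = a :: K' := by
  have hh := fsKeep_head a t hk
  cases hc : fsKeep ((a :: t).zip t) with
  | nil => exact absurd hc hk
  | cons c K' =>
      rw [hc] at hh
      simp only [List.head?_cons, Option.some_inj] at hh
      subst hh
      exact ⟨K', rfl⟩

-- the circular pair list splits into the linear pairs plus the wraparound pair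
theorem fsZipCirc (t : List Int) (a c : Int) :
    (a :: t).zip (t ++ [c]) = (a :: t).zip t ++ [((a :: t).getLast (by simp), c)] := by
  induction t generalizing a with
  | nil => simp
  | cons b t ih =>
      simp only [List.cons_append, List.zip_cons_cons]
      rw [ih b]
      simp

theorem fsPairs_cons (a : Int) (t : List Int) :
    fsPairs (a :: t) = (a :: t).zip t ++ [((a :: t).getLast (by simp), a)] := by
  unfold fsPairs
  simp only [List.tail_cons, List.take_succ_cons, List.take_zero]
  exact fsZipCirc t a a

-- the kept list followed by the final element has no equal adjacent pair
theorem fsChain (a : Int) (t : List Int) :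
    List.IsChain (· ≠ ·) (fsKeep ((a :: t).zip t) ++ [(a :: t).getLast (by simp)]) := by
  induction t generalizing a with
  | nil => simpa [fsKeep] using List.isChain_singleton _
  | cons b t ih =>
      have hlast : (a :: b :: t).getLast (by simp) = (b :: t).getLast (by simp) := by
        simp [List.getLast_cons]
      by_cases hab : a = b
      · subst hab
        rw [List.zip_cons_cons, fsKeep_cons_eq _ _ rfl, hlast]
        exact ih a
      · rw [List.zip_cons_cons, fsKeep_cons_ne _ _ hab, hlast, List.cons_append,
            List.isChain_cons]
        refine ⟨?_, ih b⟩
        intro y hy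
        by_cases hk : fsKeep ((b :: t).zip t) = []
        · rw [hk] at hy
          simp only [List.nil_append, List.head?_cons, Option.mem_def, Option.some_inj] at hy
          subst hy
          rw [fsKeep_nil_last b t hk]
          exact hab
        · rw [List.head?_append_of_ne_nil _ hk] at hy
          rw [fsKeep_head b t hk] at hy
          simp only [Option.mem_def, Option.some_inj] at hy
          subst hy
          exact hab

-- no equal adjacent pair means the linear scan finds nothing
theorem fsAny_lin_false (a : Int) (t : List Int) (h : List.IsChain (· ≠ ·) (a :: t)) :
    fsAny ((a :: t).zip t) = false := by
  induction t generalizing a with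
  | nil => simp [fsAny]
  | cons b t ih =>
      rw [List.isChain_cons_cons] at h
      have hrec := ih b h.2
      rw [List.zip_cons_cons]
      simp only [fsAny, List.any_cons] at hrec ⊢
      simp [h.1, hrec]

-- an unchanged scan keeps every first component
theorem fsAny_false_keep (prs : List (Int × Int)) (h : fsAny prs = false) :
    fsKeep prs = prs.map Prod.fst := by
  induction prs with
  | nil => simp [fsKeep]
  | cons p t ih =>
      have hp : ¬ p.1 = p.2 := by
        intro hc; simp [fsAny, hc] at h
      have ht : fsAny t = false := by
        simp only [fsAny, List.any_cons, Bool.or_eq_false_iff] at h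
        simpa [fsAny] using h.2
      rw [fsKeep_cons_ne _ _ hp, ih ht, List.map_cons]

theorem fsMapFst (l : List Int) : (fsPairs l).map Prod.fst = l := by
  unfold fsPairs
  exact List.map_fst_zip (by cases l <;> simp)

-- the single pair (x, c) is kept exactly when x ≠ c
theorem fsKeep_single (x c : Int) : fsKeep [(x, c)] = if x = c then [] else [x] := by
  by_cases h : x = c <;> simp [fsKeep, h]

-- B's value is the kept list of the circular pairs
theorem fsAlt_eq (l : List Int) : filter_same_alt l = fsKeep (fsPairs l) := by
  cases l with
  | nil => simp [filter_same_alt, fsKeep, fsPairs]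
  | cons a t =>
    have hfun : (fun (p : Int × Int) => if p.1 ≠ p.2 then some p.1 else none)
        = (fun (p : Int × Int) => if p.1 = p.2 then none else some p.1) := by
      funext p; by_cases h : p.1 = p.2 <;> simp [h]
    unfold filter_same_alt
    rw [PySem.List.slice_from_one, hfun]
    simp only [List.tail_cons, if_pos (by simp : (a :: t) ≠ [])]
    rw [show ((a :: t).zip t).filterMap (fun p => if p.1 = p.2 then none else some p.1)
          = fsKeep ((a :: t).zip t) from rfl]
    rw [PySem.List.pyGetD_neg_one (xs := a :: t) (d := 0) (by simp)]
    rw [fsPairs_cons, fsKeep_append, fsKeep_single]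
    by_cases hk : fsKeep ((a :: t).zip t) = []
    · have hwa : (a :: t).getLast (by simp) = a := fsKeep_nil_last a t hk
      rw [hk]
      simp only [List.nil_append]
      rw [PySem.List.pyGetD_neg_one (xs := [(a :: t).getLast (by simp)]) (d := 0) (by simp)]
      simp [hwa, PySem.List.pyGetD_zero_cons]
    · obtain ⟨K', hK'⟩ := fsKeep_cons_head a t hk
      rw [hK']
      rw [PySem.List.pyGetD_neg_one_append_singleton, PySem.List.pyGetD_zero]
      simp only [List.cons_append, List.getD_cons_zero]
      by_cases haw : a = (a :: t).getLast (by simp)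
      · rw [if_pos haw, if_pos haw.symm, ← List.cons_append, List.dropLast_concat,
            List.append_nil]
      · rw [if_neg haw, if_neg (fun h => haw h.symm)]

-- one pass reaches a fixed point
theorem fsStable (l : List Int) : fsAny (fsPairs (fsKeep (fsPairs l))) = false := by
  cases l with
  | nil => rfl
  | cons a t =>
    rw [fsPairs_cons, fsKeep_append, fsKeep_single]
    have hchain := fsChain a t
    by_cases hk : fsKeep ((a :: t).zip t) = []
    · have hwa : (a :: t).getLast (by simp) = a := fsKeep_nil_last a t hk
      rw [hk, hwa]
      simp [fsPairs, fsAny]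
    · obtain ⟨K', hK'⟩ := fsKeep_cons_head a t hk
      by_cases haw : (a :: t).getLast (by simp) = a
      · rw [if_pos haw, List.append_nil, hK']
        rw [fsPairs_cons, fsAny_append, fsAny_single]
        rw [hK', haw] at hchain
        obtain ⟨hch, -, hlw⟩ := List.isChain_append.1 hchain
        have hne : (a :: K').getLast (by simp) ≠ a := by
          refine hlw _ ?_ a (by simp)
          simp [List.getLast?_eq_some_getLast]
        rw [fsAny_lin_false a K' hch]
        simp [hne]
      · rw [if_neg haw, hK', List.cons_append]
        rw [fsPairs_cons, fsAny_append, fsAny_single]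
        have hchain' : List.IsChain (· ≠ ·)
            (a :: (K' ++ [(a :: t).getLast (by simp)])) := by
          rw [← List.cons_append, ← hK']; exact hchain
        have hlastw : (a :: (K' ++ [(a :: t).getLast (by simp)])).getLast (by simp)
            = (a :: t).getLast (by simp) := by
          rw [List.getLast_cons (by simp)]
          exact List.getLast_concat
        rw [fsAny_lin_false _ _ hchain', hlastw]
        simp [haw]

theorem fsLoop_eq (n : Nat) (l : List Int) (hn : l.length ≤ n) :
    fsLoop l = fsKeep (fsPairs l) := by
  induction n generalizing l with
  | zero =>
      have hl : l = [] := by cases l <;> simp_all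
      subst hl
      rw [fsLoop]
      have h0 : fsPass [] = ([], false) := by rw [fsPass_eq]; simp [fsPairs, fsKeep, fsAny]
      simp [h0, fsPairs, fsKeep]
  | succ n ih =>
      rw [fsLoop]
      by_cases hc : (fsPass l).2 = true
      · rw [dif_pos hc]
        have hlt := fsPass_lt l hc
        have h1 : (fsPass l).1 = fsKeep (fsPairs l) := by rw [fsPass_eq]
        rw [h1] at hlt ⊢
        rw [ih _ (by omega)]
        rw [fsAny_false_keep _ (fsStable l)]
        exact fsMapFst _
      · rw [dif_neg hc]
        rw [fsPass_eq]

-- ===== VERDICT (by name: the statement is the Claim_ definition above) =====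
theorem filter_same_spec : Claim_equal_filter_same := by
  intro ps _
  unfold Spec_filter_same filter_same
  rw [fsLoop_eq ps.length ps le_rfl, fsAlt_eq]
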